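-- pv_equiv track=rewrite | github.com/marsmith/ADONNIS | backEnd/SnapSites.py | getSiteStreamNameIdentifier
-- ===== SOURCE A (Python) =====
-- adverbNameSeparators = [" at ", " above ", " near ", " below "]
--
-- def getSiteStreamNameIdentifier (siteName):
--     lowerCase = siteName.lower()
--     endIndex = len(siteName)-1
--     for adverb in adverbNameSeparators:
--         try:
--             endIndex = min(endIndex, lowerCase.index(adverb))
--         except:
--             pass
--     split = lowerCase[0:endIndex]
--
--     if endIndex == len(siteName)-1:
--         return ""
--     return lowerCase[0:endIndex]
-- ===== SOURCE B (Python) =====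
-- adverbNameSeparators = [" at ", " above ", " near ", " below "]
--
-- def getSiteStreamNameIdentifier(siteName):
--     lowerCase = siteName.lower()
--     for i in range(len(lowerCase)):
--         if any(lowerCase.startswith(adv, i) for adv in adverbNameSeparators):
--             return lowerCase[:i]
--     return ""
-- ===== Notes on version B (the rewrite author's own statement) =====
-- stated objective: alternative
-- what changed: A runs four independent substring searches (one str.index per separator, exceptions swallowed) and keeps a running min plus a sentinel len-1 comparison; B does one left-to-right scan over the lowered string and returns the prefix at the first position where any separator starts, with no index bookkeeping.
import Mathlib
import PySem

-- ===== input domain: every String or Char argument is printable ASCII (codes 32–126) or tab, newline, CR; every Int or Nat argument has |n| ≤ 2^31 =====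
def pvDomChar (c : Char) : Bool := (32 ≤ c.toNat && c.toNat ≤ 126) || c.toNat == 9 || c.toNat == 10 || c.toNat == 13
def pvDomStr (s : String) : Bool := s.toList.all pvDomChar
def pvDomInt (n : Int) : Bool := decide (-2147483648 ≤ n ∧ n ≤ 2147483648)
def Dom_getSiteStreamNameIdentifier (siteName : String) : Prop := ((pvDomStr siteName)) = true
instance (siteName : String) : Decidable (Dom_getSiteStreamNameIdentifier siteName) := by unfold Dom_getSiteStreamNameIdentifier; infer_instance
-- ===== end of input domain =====

-- B replaces A's four separate substring searches with a running min by one left-to-right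
-- scan returning at the first position where any separator starts (objective: alternative).

-- ===== PORT A =====
def adverbNameSeparators : List String := [" at ", " above ", " near ", " below "]

def getSiteStreamNameIdentifier (siteName : String) : String :=
  let lowerCase := PySem.Str.lower siteName
  let endIndex : Int :=
    adverbNameSeparators.foldl
      (fun endIndex adverb =>
        -- try: endIndex = min(endIndex, lowerCase.index(adverb)) except: pass
        let idx := PySem.Str.find lowerCase adverb
        if idx = -1 then endIndex else min endIndex idx)
      (PySem.Str.len siteName - 1)
  if endIndex = PySem.Str.len siteName - 1 then ""
  else PySem.Str.slice lowerCase (some 0) (some endIndex)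

-- ===== PORT B =====
-- Source B's `for i in range(len(lowerCase))` loop: structural recursion over the suffix, carrying i
def pvScan : List Char → Nat → Option Nat
  | [], _ => none
  | c :: rest, i =>
      if adverbNameSeparators.any (fun adv => PySem.Chars.startswith (c :: rest) adv.toList) then some i
      else pvScan rest (i + 1)

def getSiteStreamNameIdentifier_alt (siteName : String) : String :=
  let lowerCase := (PySem.Str.lower siteName).toList
  match pvScan lowerCase 0 with
  | some i => String.ofList (lowerCase.take i)   -- lowerCase[:i]
  | none => ""

-- ===== PRECONDITION & SPEC =====
def Spec_getSiteStreamNameIdentifier (siteName : String) (out : String) : Prop := out = getSiteStreamNameIdentifier_alt siteName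
instance (siteName : String) (out : String) : Decidable (Spec_getSiteStreamNameIdentifier siteName out) := by unfold Spec_getSiteStreamNameIdentifier; infer_instance

-- ===== CLAIM (what is proved, stated in full; the proofs are below) =====
def Claim_equal_getSiteStreamNameIdentifier : Prop := ∀ (siteName : String), Dom_getSiteStreamNameIdentifier siteName → Spec_getSiteStreamNameIdentifier siteName (getSiteStreamNameIdentifier siteName)

-- ===== LEMMAS AND PROOFS =====

-- the scan predicate: some separator starts at the head of s
def pvP (s : List Char) : Bool :=
  adverbNameSeparators.any (fun adv => PySem.Chars.startswith s adv.toList)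

-- A's fold, abstracted over the separator list, on the Chars side
def pvFold (cs : List Char) (ls : List String) (e : Int) : Int :=
  ls.foldl (fun e adv =>
    if PySem.Chars.find cs adv.toList = -1 then e else min e (PySem.Chars.find cs adv.toList)) e

lemma pvFold_of_all_none (cs : List Char) (ls : List String) (e : Int)
    (h : ∀ a ∈ ls, PySem.Chars.find cs a.toList = -1) : pvFold cs ls e = e := by
  induction ls generalizing e with
  | nil => rfl
  | cons a t ih =>
      simp only [pvFold, List.foldl_cons] at *
      rw [if_pos (h a (by simp))]
      exact ih e (fun b hb => h b (by simp [hb]))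

lemma pvFold_le_init (cs : List Char) (ls : List String) (e : Int) : pvFold cs ls e ≤ e := by
  induction ls generalizing e with
  | nil => simp [pvFold]
  | cons a t ih =>
      simp only [pvFold, List.foldl_cons]
      split
      · exact ih e
      · exact le_trans (ih _) (min_le_left _ _)

lemma pvFold_le_find (cs : List Char) (ls : List String) (e : Int) (a : String)
    (ha : a ∈ ls) (hf : PySem.Chars.find cs a.toList ≠ -1) :
    pvFold cs ls e ≤ PySem.Chars.find cs a.toList := by
  induction ls generalizing e with
  | nil => simp at ha
  | cons b t ih =>
      simp only [pvFold, List.foldl_cons]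
      rcases List.mem_cons.mp ha with rfl | ha'
      · rw [if_neg hf]
        exact le_trans (pvFold_le_init cs t _) (min_le_right _ _)
      · split
        · exact ih _ ha'
        · exact ih _ ha'

lemma pvFold_mem (cs : List Char) (ls : List String) (e : Int) :
    pvFold cs ls e = e ∨
      ∃ a ∈ ls, PySem.Chars.find cs a.toList ≠ -1 ∧ pvFold cs ls e = PySem.Chars.find cs a.toList := by
  induction ls generalizing e with
  | nil => left; rfl
  | cons b t ih =>
      simp only [pvFold] at ih ⊢
      rw [List.foldl_cons]
      by_cases h : PySem.Chars.find cs b.toList = -1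
      · rw [if_pos h]
        rcases ih e with h1 | ⟨a, ha, hf, he⟩
        · left; exact h1
        · right; exact ⟨a, by simp [ha], hf, he⟩
      · rw [if_neg h]
        rcases ih (min e (PySem.Chars.find cs b.toList)) with h1 | ⟨a, ha, hf, he⟩
        · rcases le_or_gt e (PySem.Chars.find cs b.toList) with hle | hlt
          · left; rw [h1]; exact min_eq_left hle
          · right; exact ⟨b, by simp, h, by rw [h1]; exact min_eq_right hlt.le⟩
        · right; exact ⟨a, by simp [ha], hf, he⟩

-- pvScan finds exactly the first position at which pvP holds
lemma pvScan_none_iff (cs : List Char) : ∀ i, pvScan cs i = none ↔ ∀ k < cs.length, pvP (cs.drop k) = false := by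
  induction cs with
  | nil => simp [pvScan]
  | cons c rest ih =>
      intro i
      simp only [pvScan, pvP]
      by_cases h : (adverbNameSeparators.any fun adv => PySem.Chars.startswith (c :: rest) adv.toList) = true
      · rw [if_pos h]
        simp only [reduceCtorEq, false_iff]
        push Not
        exact ⟨0, by simp, by simpa [pvP] using h⟩
      · rw [if_neg h, ih (i + 1)]
        constructor
        · intro hall k hk
          cases k with
          | zero => simpa [pvP] using h
          | succ k' => exact hall k' (by simpa using hk)
        · intro hall k hk
          have := hall (k + 1) (by simpa using hk)
          simpa [pvP] using this
  
lemma pvScan_some (cs : List Char) : ∀ i m, pvScan cs i = some m →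
    ∃ j, m = i + j ∧ j < cs.length ∧ pvP (cs.drop j) = true ∧ ∀ k < j, pvP (cs.drop k) = false := by
  induction cs with
  | nil => intro i m h; simp [pvScan] at h
  | cons c rest ih =>
      intro i m h
      simp only [pvScan] at h
      by_cases hp : (adverbNameSeparators.any fun adv => PySem.Chars.startswith (c :: rest) adv.toList) = true
      · rw [if_pos hp] at h
        obtain rfl : i = m := by simpa using h
        exact ⟨0, by omega, by simp, by simpa [pvP] using hp, by omega⟩
      · rw [if_neg hp] at h
        rcases ih (i + 1) m h with ⟨j, hm, hj, hP, hmin⟩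
        refine ⟨j + 1, by omega, by simpa using hj, by simpa using hP, ?_⟩
        intro k hk
        cases k with
        | zero => simpa [pvP] using hp
        | succ k' => exact hmin k' (by omega)

lemma adv_len : ∀ a ∈ adverbNameSeparators, 4 ≤ a.toList.length := by decide

-- pvP at position j names a separator that really occurs in cs, no earlier than its find
lemma pvP_drop_facts (cs : List Char) (j : Nat) (h : pvP (cs.drop j) = true) :
    ∃ a ∈ adverbNameSeparators, PySem.Chars.find cs a.toList ≠ -1 ∧
      PySem.Chars.find cs a.toList ≤ (j : Int) ∧ (PySem.Chars.find cs a.toList).toNat + 4 ≤ cs.length := by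
  rcases List.any_eq_true.mp h with ⟨a, ha, hsw⟩
  have hpre : a.toList <+: cs.drop j := (PySem.Chars.startswith_iff _ _).mp hsw
  have hinf : a.toList <:+: cs := hpre.isInfix.trans (List.drop_suffix j cs).isInfix
  have hne : PySem.Chars.find cs a.toList ≠ -1 := (PySem.Chars.find_ne_neg_one_iff _ _).mpr hinf
  have hnn : 0 ≤ PySem.Chars.find cs a.toList := by
    have := PySem.Chars.neg_one_le_find cs a.toList
    omega
  obtain ⟨hfp, hfmin⟩ := PySem.Chars.find_spec hnn
  have hle : (PySem.Chars.find cs a.toList).toNat ≤ j := by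
    by_contra hgt
    exact hfmin j (by omega) hpre
  have hlen4 : 4 ≤ a.toList.length := adv_len a ha
  have hlen : (PySem.Chars.find cs a.toList).toNat + 4 ≤ cs.length := by
    have h1 := hfp.length_le
    rw [List.length_drop] at h1
    omega
  exact ⟨a, ha, hne, by omega, hlen⟩

lemma main_eq (siteName : String) :
    getSiteStreamNameIdentifier siteName = getSiteStreamNameIdentifier_alt siteName := by
  have hA : getSiteStreamNameIdentifier siteName =
      (if pvFold (PySem.Chars.lower siteName.toList) adverbNameSeparators ((siteName.toList.length : Int) - 1)
            = (siteName.toList.length : Int) - 1 then ""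
       else PySem.Str.slice (PySem.Str.lower siteName) (some 0)
            (some (pvFold (PySem.Chars.lower siteName.toList) adverbNameSeparators ((siteName.toList.length : Int) - 1)))) := by
    simp [getSiteStreamNameIdentifier, pvFold]
  have hB : getSiteStreamNameIdentifier_alt siteName =
      (match pvScan (PySem.Chars.lower siteName.toList) 0 with
       | some i => String.ofList ((PySem.Chars.lower siteName.toList).take i)
       | none => "") := by
    simp [getSiteStreamNameIdentifier_alt]
  set cs := PySem.Chars.lower siteName.toList with hcs
  have hlcs : cs.length = siteName.toList.length := by simp [hcs, PySem.Chars.lower]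
  set N : Int := (siteName.toList.length : Int) with hN
  rw [hA, hB]
  rcases hscan : pvScan cs 0 with _ | m
  · -- no separator occurs anywhere: the fold keeps its initial value, both return ""
    have hnone := (pvScan_none_iff cs 0).mp hscan
    have hall : ∀ a ∈ adverbNameSeparators, PySem.Chars.find cs a.toList = -1 := by
      intro a ha
      by_contra hne
      have hinf : a.toList <:+: cs := (PySem.Chars.find_ne_neg_one_iff _ _).mp hne
      have hisin : PySem.Chars.isIn a.toList cs = true := (PySem.Chars.isIn_iff_infix _ _).mpr hinf
      rcases (PySem.Chars.exists_prefix_drop_iff_isIn _ _).mpr hisin with ⟨j, hpre⟩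
      have hlen4 : 4 ≤ a.toList.length := adv_len a ha
      have hj : j < cs.length := by
        by_contra hge
        have hnil : cs.drop j = [] := List.drop_eq_nil_of_le (by omega)
        have hl := hpre.length_le
        rw [hnil] at hl
        simp only [List.length_nil, Nat.le_zero] at hl
        omega
      have hPj : pvP (cs.drop j) = true := by
        simp only [pvP, List.any_eq_true]
        exact ⟨a, ha, (PySem.Chars.startswith_iff _ _).mpr hpre⟩
      rw [hnone j hj] at hPj
      exact absurd hPj (by simp)
    rw [pvFold_of_all_none cs adverbNameSeparators (N - 1) hall, if_pos rfl]
  · -- first separator position m: the fold's running min equals m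
    rcases pvScan_some cs 0 m hscan with ⟨j, hm, hj, hP, hmin⟩
    obtain rfl : m = j := by omega
    set F := pvFold cs adverbNameSeparators (N - 1) with hF
    rcases pvP_drop_facts cs m hP with ⟨a, ha, hane, haj, halen⟩
    have hFle : F ≤ PySem.Chars.find cs a.toList := pvFold_le_find cs adverbNameSeparators (N - 1) a ha hane
    have hflt : PySem.Chars.find cs a.toList < N - 1 := by
      have h0 : 0 ≤ PySem.Chars.find cs a.toList := by
        have := PySem.Chars.neg_one_le_find cs a.toList
        omega
      omega
    have hFlt : F < N - 1 := lt_of_le_of_lt hFle hflt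
    rcases pvFold_mem cs adverbNameSeparators (N - 1) with hFe | ⟨b, hb, hbne, hbF⟩
    · rw [← hF] at hFe
      omega
    · rw [← hF] at hbF
      have hb0 : 0 ≤ PySem.Chars.find cs b.toList := by
        have := PySem.Chars.neg_one_le_find cs b.toList
        omega
      obtain ⟨hbp, _⟩ := PySem.Chars.find_spec hb0
      have hPF : pvP (cs.drop (PySem.Chars.find cs b.toList).toNat) = true := by
        simp only [pvP, List.any_eq_true]
        exact ⟨b, hb, (PySem.Chars.startswith_iff _ _).mpr hbp⟩
      have hjF : m ≤ (PySem.Chars.find cs b.toList).toNat := by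
        by_contra hlt
        rw [hmin _ (by omega)] at hPF
        exact absurd hPF (by simp)
      have hFj : F = (m : Int) := by omega
      rw [if_neg (by omega)]
      have hred : (match some m with
          | some i => String.ofList (List.take i cs)
          | none => ("" : String)) = String.ofList (List.take m cs) := rfl
      rw [hred]
      apply String.toList_inj.mp
      have h0F : (0 : Int) ≤ F := by omega
      simp only [PySem.Str.toList_slice, PySem.Chars.slice_eq_listSlice, PySem.Str.toList_lower, ← hcs]
      rw [PySem.List.slice_zero_start, PySem.List.slice_to (xs := cs) h0F, hFj]
      simp

-- ===== VERDICT (by name: the statement is the Claim_ definition above) =====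
theorem getSiteStreamNameIdentifier_spec : Claim_equal_getSiteStreamNameIdentifier := by
  intro siteName _
  unfold Spec_getSiteStreamNameIdentifier
  exact main_eq siteName
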